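-- pv_equiv track=rewrite | github.com/jbowler432/tenb-reports | beautifyResults.py | get_compliance_details
-- ===== SOURCE A (Python) =====
-- def get_compliance_details(results,k):
-- 	return_str="<table class=plugdesc>"
-- 	newlist=sorted(results, key=lambda d: d['status'])
-- 	for x in newlist:
-- 		status=x['status'].lower()
-- 		if x['asset_uuid']==k:
-- 			if x['status']!="ERROR":
-- 				return_str+="<tr><td class="+status+">"+x['status']+"</td><td>"+clean_string(x['check_name'])+"</td>\n"
-- 	return_str+="</table>"
-- 	return return_str
--
-- def clean_string(mystr):
-- 	return_str=mystr.replace("<","&lt;")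
-- 	return_str=return_str.replace(">","&gt;")
-- 	return_str=return_str.replace("\n","<br>")
-- 	return_str=return_str.replace("\t","")
-- 	return return_str
-- ===== SOURCE B (Python) =====
-- def clean_string(mystr):
--     return_str = mystr.replace("<", "&lt;")
--     return_str = return_str.replace(">", "&gt;")
--     return_str = return_str.replace("\n", "<br>")
--     return_str = return_str.replace("\t", "")
--     return return_str
--
-- def get_compliance_details(results, k):
--     # One pass: bucket rows by status (insertion order kept inside each bucket),
--     # then walk the buckets in sorted-key order -- same output as a stable sort by status.
--     buckets = {}
--     for x in results:
--         buckets.setdefault(x['status'], []).append(x)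
--     out = "<table class=plugdesc>"
--     for status_key in sorted(buckets):
--         for x in buckets[status_key]:
--             if x['asset_uuid'] == k and x['status'] != "ERROR":
--                 out += "<tr><td class=" + x['status'].lower() + ">" + x['status'] + "</td><td>" + clean_string(x['check_name']) + "</td>\n"
--     out += "</table>"
--     return out
-- ===== Notes on version B (the rewrite author's own statement) =====
-- stated objective: alternative
-- what changed: B replaces the stable sort of the whole row list by a single bucketing pass into a status-keyed dict (insertion order kept inside each bucket) and then walks the buckets in sorted status order.
import Mathlib
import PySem

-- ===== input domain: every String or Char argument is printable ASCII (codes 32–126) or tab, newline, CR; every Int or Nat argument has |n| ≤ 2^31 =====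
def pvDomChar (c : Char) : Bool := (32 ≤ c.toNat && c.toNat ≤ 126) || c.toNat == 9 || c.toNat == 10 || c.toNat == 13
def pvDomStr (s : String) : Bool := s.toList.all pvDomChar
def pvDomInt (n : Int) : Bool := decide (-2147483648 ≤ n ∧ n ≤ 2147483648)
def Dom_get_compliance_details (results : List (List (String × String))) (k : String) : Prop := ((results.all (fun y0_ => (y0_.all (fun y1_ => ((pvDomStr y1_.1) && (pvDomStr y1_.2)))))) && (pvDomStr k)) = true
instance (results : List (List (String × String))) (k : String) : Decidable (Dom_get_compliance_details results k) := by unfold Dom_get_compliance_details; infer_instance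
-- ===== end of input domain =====

-- B re-groups the rows into per-status buckets in one pass and walks the buckets in sorted key
-- order instead of stable-sorting the whole row list (objective: alternative decomposition).

-- Python dict field access x[key] (first match in the association list; Pre_ guarantees presence)
def rowGet (d : List (String × String)) (key : String) : String :=
  (PySem.Dict.mk d).getD key ""

def clean_string (mystr : String) : String :=
  let r := PySem.Str.replace mystr "<" "&lt;"
  let r := PySem.Str.replace r ">" "&gt;"
  let r := PySem.Str.replace r "\n" "<br>"
  let r := PySem.Str.replace r "\t" ""
  r

-- ===== PORT A =====
def get_compliance_details (results : List (List (String × String))) (k : String) : String :=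
  let return_str := "<table class=plugdesc>"
  let newlist := PySem.List.sorted results (fun d => rowGet d "status")
  let return_str := newlist.foldl (fun acc x =>
    let status := PySem.Str.lower (rowGet x "status")
    if rowGet x "asset_uuid" == k then
      if rowGet x "status" != "ERROR" then
        acc ++ ("<tr><td class=" ++ status ++ ">" ++ rowGet x "status" ++ "</td><td>" ++
          clean_string (rowGet x "check_name") ++ "</td>\n")
      else acc
    else acc) return_str
  return_str ++ "</table>"

-- ===== PORT B =====
def get_compliance_details_alt (results : List (List (String × String))) (k : String) : String :=
  let buckets := results.foldl
    (fun d x => d.modify (rowGet x "status") [] (fun l => l ++ [x])) PySem.Dict.empty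
  let out := "<table class=plugdesc>"
  let out := (PySem.List.sorted buckets.keys (fun s => s)).foldl (fun out skey =>
      (buckets.getD skey []).foldl (fun out x =>
        if rowGet x "asset_uuid" == k && rowGet x "status" != "ERROR" then
          out ++ ("<tr><td class=" ++ PySem.Str.lower (rowGet x "status") ++ ">" ++
            rowGet x "status" ++ "</td><td>" ++ clean_string (rowGet x "check_name") ++ "</td>\n")
        else out) out) out
  out ++ "</table>"

-- ===== PRECONDITION & SPEC =====
def hasKey (d : List (String × String)) (key : String) : Bool := d.any (fun p => p.1 == key)

-- Pre_ excludes exactly the inputs where Python A raises KeyError: a row missing 'status' or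
-- 'asset_uuid', or a row missing 'check_name' that reaches the HTML-emitting branch.
def Pre_get_compliance_details (results : List (List (String × String))) (k : String) : Prop :=
  ∀ x ∈ results, hasKey x "status" = true ∧ hasKey x "asset_uuid" = true ∧
    ((rowGet x "asset_uuid" = k ∧ rowGet x "status" ≠ "ERROR") → hasKey x "check_name" = true)
instance (results : List (List (String × String))) (k : String) :
    Decidable (Pre_get_compliance_details results k) := by
  unfold Pre_get_compliance_details; infer_instance

def pvWitness_get_compliance_details : (List (List (String × String))) × String :=
  ([[("status", "PASSED"), ("asset_uuid", "u1"), ("check_name", "c1")],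
    [("status", "FAILED"), ("asset_uuid", "u2"), ("check_name", "c2")]], "u1")

def Spec_get_compliance_details (results : List (List (String × String))) (k : String) (out : String) : Prop := out = get_compliance_details_alt results k
instance (results : List (List (String × String))) (k : String) (out : String) : Decidable (Spec_get_compliance_details results k out) := by unfold Spec_get_compliance_details; infer_instance

-- ===== CLAIM (what is proved, stated in full; the proofs are below) =====
def Claim_equal_get_compliance_details : Prop := ∀ (results : List (List (String × String))) (k : String), Dom_get_compliance_details results k → Pre_get_compliance_details results k → Spec_get_compliance_details results k (get_compliance_details results k)

-- ===== LEMMAS AND PROOFS =====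

-- one unfolding step of insertBy
theorem insertBy_cons {α : Type} (b : α → α → Bool) (x y : α) (ys : List α) :
    PySem.List.insertBy b x (y :: ys) =
      if b x y then x :: y :: ys else y :: PySem.List.insertBy b x ys := rfl

theorem insertBy_nil {α : Type} (b : α → α → Bool) (x : α) :
    PySem.List.insertBy b x [] = [x] := rfl

theorem insertBy_of_forall_before {α : Type} (b : α → α → Bool) (x : α) (ys : List α)
    (h : ∀ y ∈ ys, b x y = true) : PySem.List.insertBy b x ys = x :: ys := by
  cases ys with
  | nil => rfl
  | cons y t => rw [insertBy_cons, if_pos (h y (by simp))]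

theorem insertBy_append_not {α : Type} (b : α → α → Bool) (x : α) (l m : List α)
    (h : ∀ y ∈ l, b x y = false) :
    PySem.List.insertBy b x (l ++ m) = l ++ PySem.List.insertBy b x m := by
  induction l with
  | nil => rfl
  | cons y t ih =>
      have hy := h y (by simp)
      rw [List.cons_append, insertBy_cons, hy]
      simp only [Bool.false_eq_true, if_false]
      rw [ih (fun z hz => h z (by simp [hz])), List.cons_append]

-- stable insertion of x into a bucket decomposition: x goes to the end of its key's bucket
theorem insertBy_flatMap {α : Type} (key : α → String) (x : α) :
    ∀ (S : List String) (F : String → List α),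
      S.Pairwise (· < ·) →
      (key x ∉ S → F (key x) = []) →
      (∀ t ∈ S, F t ≠ []) →
      (∀ t, ∀ y ∈ F t, key y = t) →
      PySem.List.insertBy (fun a b => decide (key a < key b)) x (S.flatMap F) =
        (if key x ∈ S then S
         else PySem.List.insertBy (fun a b => decide (a < b)) (key x) S).flatMap
          (fun s => F s ++ if s = key x then [x] else []) := by
  intro S
  induction S with
  | nil =>
      intro F _ hFout _ _
      rw [List.flatMap_nil, insertBy_nil, if_neg (List.not_mem_nil), insertBy_nil,
        List.flatMap_cons, List.flatMap_nil, hFout (List.not_mem_nil), if_pos rfl]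
      rfl
  | cons s S' ih =>
      intro F hS hFout hne hkeys
      have hlt : ∀ t ∈ S', s < t := fun t ht => (List.pairwise_cons.mp hS).1 t ht
      have hS' : S'.Pairwise (· < ·) := (List.pairwise_cons.mp hS).2
      have hsnotin : s ∉ S' := fun hmem => lt_irrefl s (hlt s hmem)
      have hflatgt : ∀ z ∈ S'.flatMap F, ∃ t ∈ S', key z = t := by
        intro z hz
        obtain ⟨t, ht, hzt⟩ := List.mem_flatMap.mp hz
        exact ⟨t, ht, hkeys t z hzt⟩
      rcases lt_trichotomy (key x) s with h | h | h
      · -- key x < s : x is inserted in front; its key is fresh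
        have hnotin : key x ∉ s :: S' := by
          intro hmem
          rcases List.mem_cons.mp hmem with rfl | hmem
          · exact lt_irrefl _ h
          · exact lt_irrefl _ (h.trans (hlt _ hmem))
        have h1 : PySem.List.insertBy (fun a b => decide (key a < key b)) x
            ((s :: S').flatMap F) = x :: (s :: S').flatMap F := by
          apply insertBy_of_forall_before
          intro z hz
          rw [List.flatMap_cons] at hz
          rcases List.mem_append.mp hz with hz | hz
          · rw [hkeys s z hz]
            simp only [decide_eq_true_eq]
            exact h
          · obtain ⟨t, ht, hzt⟩ := hflatgt z hz
            rw [hzt]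
            simp only [decide_eq_true_eq]
            exact h.trans (hlt t ht)
        have h2 : PySem.List.insertBy (fun a b => decide (a < b)) (key x) (s :: S') =
            key x :: s :: S' := by
          apply insertBy_of_forall_before
          intro t ht
          simp only [decide_eq_true_eq]
          rcases List.mem_cons.mp ht with rfl | ht
          · exact h
          · exact h.trans (hlt t ht)
        have hcongr : ∀ t ∈ s :: S', (F t ++ if t = key x then [x] else []) = F t := by
          intro t ht
          rw [if_neg (by rintro rfl; exact hnotin ht), List.append_nil]
        have hGx : F (key x) ++ (if key x = key x then [x] else []) = [x] := by
          rw [hFout hnotin, if_pos rfl]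
          rfl
        rw [h1, if_neg hnotin, h2]
        conv_rhs => rw [List.flatMap_cons]
        rw [hGx, List.flatMap_congr hcongr]
        rfl
      · -- key x = s : x goes to the end of bucket s
        have hmem : key x ∈ s :: S' := by rw [h]; exact List.mem_cons_self
        have hpass : PySem.List.insertBy (fun a b => decide (key a < key b)) x
            ((s :: S').flatMap F) = F s ++ (x :: S'.flatMap F) := by
          rw [List.flatMap_cons]
          rw [insertBy_append_not _ _ _ _ (by
            intro z hz
            rw [hkeys s z hz]
            simp only [decide_eq_false_iff_not]
            rw [h]
            exact lt_irrefl _)]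
          rw [insertBy_of_forall_before _ _ _ (by
            intro z hz
            obtain ⟨t, ht, hzt⟩ := hflatgt z hz
            rw [hzt]
            simp only [decide_eq_true_eq]
            exact h.symm ▸ hlt t ht)]
        have hcongr : ∀ t ∈ S', (F t ++ if t = key x then [x] else []) = F t := by
          intro t ht
          rw [if_neg (by rintro rfl; exact hsnotin (h ▸ ht)), List.append_nil]
        rw [hpass, if_pos hmem]
        conv_rhs => rw [List.flatMap_cons]
        rw [if_pos h.symm, List.flatMap_congr hcongr, List.append_assoc]
        rfl
      · -- s < key x : pass bucket s, recurse
        have hxns : key x ≠ s := ne_of_gt h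
        rw [List.flatMap_cons]
        rw [insertBy_append_not _ _ _ _ (by
          intro z hz
          rw [hkeys s z hz]
          simp only [decide_eq_false_iff_not]
          exact not_lt.mpr h.le)]
        rw [ih F hS' (fun hnm => hFout (by simp [hxns, hnm]))
          (fun t ht => hne t (by simp [ht])) hkeys]
        have hGs : F s ++ (if s = key x then [x] else []) = F s := by
          rw [if_neg (Ne.symm hxns), List.append_nil]
        by_cases hmem : key x ∈ S'
        · rw [if_pos hmem, if_pos (by simp [hmem]), List.flatMap_cons, hGs]
        · rw [if_neg hmem, if_neg (by simp [hxns, hmem]),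
            insertBy_cons, if_neg (by simp only [decide_eq_true_eq]; exact not_lt.mpr h.le),
            List.flatMap_cons, hGs]

-- one foldl step of sorted over an appended element
theorem sorted_append_singleton {α : Type} (xs : List α) (x : α) (key : α → String) :
    PySem.List.sorted (xs ++ [x]) key =
      PySem.List.insertBy (fun a b => decide (key a < key b)) x (PySem.List.sorted xs key) := by
  rw [PySem.List.sorted_eq_foldl_insertBy, PySem.List.sorted_eq_foldl_insertBy,
    List.foldl_append]
  rfl

theorem set_ofList_append_singleton (l : List String) (a : String) :
    PySem.Set.ofList (l ++ [a]) = PySem.Set.add (PySem.Set.ofList l) a := by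
  rw [PySem.Set.ofList_eq_foldl, PySem.Set.ofList_eq_foldl, List.foldl_append]
  rfl

-- the stable sort by key is the concatenation of the original-order buckets in sorted key order
theorem sorted_eq_bucket_flatMap {α : Type} (key : α → String) (xs : List α) :
    PySem.List.sorted xs key =
      (PySem.List.sorted (PySem.Set.ofList (xs.map key)) (fun s => s)).flatMap
        (fun s => xs.filter (fun x => key x == s)) := by
  induction xs using List.reverseRecOn with
  | nil => simp [PySem.List.sorted]
  | append_singleton xs x ih =>
      rw [sorted_append_singleton, ih]
      set S := PySem.List.sorted (PySem.Set.ofList (xs.map key)) (fun s => s) with hSdef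
      have hmemS : ∀ t, t ∈ S ↔ t ∈ xs.map key := by
        intro t
        rw [hSdef, PySem.List.mem_sorted, PySem.Set.mem_ofList]
      rw [insertBy_flatMap key x S _ (PySem.List.sorted_ofList_pairwise_lt _)
        (by
          intro hnm
          have hxn : key x ∉ xs.map key := fun hc => hnm ((hmemS _).mpr hc)
          rw [List.filter_eq_nil_iff]
          intro a ha
          simp only [beq_iff_eq]
          intro hc
          exact hxn (hc ▸ List.mem_map_of_mem ha))
        (by
          intro t ht
          obtain ⟨a, ha, rfl⟩ := List.mem_map.mp ((hmemS t).mp ht)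
          intro hnil
          rw [List.filter_eq_nil_iff] at hnil
          exact hnil a ha (by simp))
        (by
          intro t y hy
          have := List.of_mem_filter hy
          simpa using this)]
      have hS2 : (if key x ∈ S then S
          else PySem.List.insertBy (fun a b => decide (a < b)) (key x) S) =
          PySem.List.sorted (PySem.Set.ofList ((xs ++ [x]).map key)) (fun s => s) := by
        simp only [List.map_append, List.map_cons, List.map_nil]
        rw [set_ofList_append_singleton]
        by_cases hmem : key x ∈ S
        · rw [if_pos hmem]
          have hx : key x ∈ PySem.Set.ofList (xs.map key) :=
            (PySem.Set.mem_ofList _ _).mpr ((hmemS _).mp hmem)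
          have hadd : PySem.Set.add (PySem.Set.ofList (xs.map key)) (key x) =
              PySem.Set.ofList (xs.map key) := by
            simp [PySem.Set.add, hx]
          rw [hadd, ← hSdef]
        · rw [if_neg hmem]
          have hx : key x ∉ PySem.Set.ofList (xs.map key) := by
            rw [PySem.Set.mem_ofList]
            intro hc
            exact hmem ((hmemS _).mpr hc)
          have hadd : PySem.Set.add (PySem.Set.ofList (xs.map key)) (key x) =
              PySem.Set.ofList (xs.map key) ++ [key x] := by
            simp [PySem.Set.add, hx]
          rw [hadd, sorted_append_singleton, ← hSdef]
      have hfun : (fun s => xs.filter (fun y => key y == s) ++ if s = key x then [x] else []) =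
          (fun s => (xs ++ [x]).filter (fun y => key y == s)) := by
        funext s
        rw [List.filter_append]
        congr 1
        simp only [List.filter_cons, List.filter_nil]
        by_cases hks : s = key x
        · simp [hks]
        · simp [hks, Ne.symm hks]
      rw [hS2, hfun]

-- string-fold plumbing -----------------------------------------------------

def sbody {α : Type} (c : α → Bool) (f : α → String) (l : List α) : String :=
  l.foldl (fun a x => if c x then a ++ f x else a) ""

theorem sfold_shift {α : Type} (c : α → Bool) (f : α → String) (l : List α) (acc : String) :
    l.foldl (fun a x => if c x then a ++ f x else a) acc = acc ++ sbody c f l := by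
  induction l generalizing acc with
  | nil => simp [sbody, String.append_empty]
  | cons x t ih =>
      simp only [sbody, List.foldl_cons]
      by_cases h : c x
      · rw [if_pos h, if_pos h, ih, ih (("" : String) ++ f x)]
        simp [String.append_assoc]
      · rw [if_neg h, if_neg h, ih, ih ""]
        simp

theorem sbody_append {α : Type} (c : α → Bool) (f : α → String) (l m : List α) :
    sbody c f (l ++ m) = sbody c f l ++ sbody c f m := by
  simp only [sbody, List.foldl_append]
  rw [sfold_shift]
  rfl

theorem sbody_flatMap {α β : Type} (c : α → Bool) (f : α → String) (g : β → List α)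
    (S : List β) (acc : String) :
    S.foldl (fun out s => (g s).foldl (fun a x => if c x then a ++ f x else a) out) acc =
      acc ++ sbody c f (S.flatMap g) := by
  induction S generalizing acc with
  | nil => simp [sbody, String.append_empty]
  | cons s S' ih =>
      simp only [List.foldl_cons, List.flatMap_cons]
      rw [sfold_shift, ih, sbody_append, String.append_assoc]

-- program-level abbreviations
def rowCond (k : String) (x : List (String × String)) : Bool :=
  rowGet x "asset_uuid" == k && rowGet x "status" != "ERROR"

def rowFrag (x : List (String × String)) : String :=
  "<tr><td class=" ++ PySem.Str.lower (rowGet x "status") ++ ">" ++ rowGet x "status" ++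
    "</td><td>" ++ clean_string (rowGet x "check_name") ++ "</td>\n"

theorem portA_eq (results : List (List (String × String))) (k : String) :
    get_compliance_details results k =
      "<table class=plugdesc>" ++
        sbody (rowCond k) rowFrag
          (PySem.List.sorted results (fun d => rowGet d "status")) ++ "</table>" := by
  unfold get_compliance_details
  simp only []
  have hfun : (fun (acc : String) (x : List (String × String)) =>
      let status := PySem.Str.lower (rowGet x "status")
      if rowGet x "asset_uuid" == k then
        if rowGet x "status" != "ERROR" then
          acc ++ ("<tr><td class=" ++ status ++ ">" ++ rowGet x "status" ++ "</td><td>" ++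
            clean_string (rowGet x "check_name") ++ "</td>\n")
        else acc
      else acc) =
      (fun acc x => if rowCond k x then acc ++ rowFrag x else acc) := by
    funext acc x
    simp only [rowCond, rowFrag, Bool.and_eq_true]
    by_cases h1 : rowGet x "asset_uuid" == k
    · by_cases h2 : rowGet x "status" != "ERROR" <;> simp [h1, h2]
    · simp [h1]
  rw [hfun, sfold_shift]

theorem buckets_getD (results : List (List (String × String))) (s : String) :
    (results.foldl (fun d x => d.modify (rowGet x "status") [] (fun l => l ++ [x]))
        PySem.Dict.empty).getD s [] =
      results.filter (fun x => rowGet x "status" == s) := by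
  have h1 : results.foldl (fun d x => d.modify (rowGet x "status") [] (fun l => l ++ [x]))
      PySem.Dict.empty =
      (results.map (fun x => (rowGet x "status", x))).foldl
        (fun d p => d.modify p.1 [] (fun l => l ++ [p.2])) PySem.Dict.empty := by
    rw [List.foldl_map]
  rw [h1, PySem.Dict.getD_foldl_modify_append]
  simp [List.filter_map, Function.comp_def]

theorem buckets_keys (results : List (List (String × String))) :
    (results.foldl (fun d x => d.modify (rowGet x "status") [] (fun l => l ++ [x]))
        PySem.Dict.empty).keys =
      PySem.Set.ofList (results.map (fun x => rowGet x "status")) := by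
  rw [PySem.Dict.keys_foldl_modify_key results (fun x => rowGet x "status") []
    (fun _ x => fun l => l ++ [x]) PySem.Dict.empty]
  rw [PySem.Dict.keys_empty, PySem.Set.ofList_eq_foldl]
  rfl

theorem portB_eq (results : List (List (String × String))) (k : String) :
    get_compliance_details_alt results k =
      "<table class=plugdesc>" ++
        sbody (rowCond k) rowFrag
          ((PySem.List.sorted
              (PySem.Set.ofList (results.map (fun x => rowGet x "status"))) (fun s => s)).flatMap
            (fun s => results.filter (fun x => rowGet x "status" == s))) ++ "</table>" := by
  unfold get_compliance_details_alt
  simp only []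
  have hinner : (fun (out : String) (x : List (String × String)) =>
      if rowGet x "asset_uuid" == k && rowGet x "status" != "ERROR" then
        out ++ ("<tr><td class=" ++ PySem.Str.lower (rowGet x "status") ++ ">" ++
          rowGet x "status" ++ "</td><td>" ++ clean_string (rowGet x "check_name") ++ "</td>\n")
      else out) = (fun out x => if rowCond k x then out ++ rowFrag x else out) := rfl
  rw [buckets_keys, hinner]
  have := sbody_flatMap (rowCond k) rowFrag
    (fun s => (results.foldl (fun d x => d.modify (rowGet x "status") [] (fun l => l ++ [x]))
        PySem.Dict.empty).getD s [])
    (PySem.List.sorted (PySem.Set.ofList (results.map (fun x => rowGet x "status"))) (fun s => s))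
    "<table class=plugdesc>"
  rw [this]
  congr 2
  exact congrArg _ (List.flatMap_congr (fun s _ => buckets_getD results s))

-- ===== VERDICT (by name: the statement is the Claim_ definition above) =====
theorem get_compliance_details_spec : Claim_equal_get_compliance_details := by
  intro results k _ _
  unfold Spec_get_compliance_details
  rw [portA_eq, portB_eq, sorted_eq_bucket_flatMap (fun d => rowGet d "status") results]
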